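-- pv_equiv track=rewrite | github.com/aspektr/python_algorithms | 7_dynamic_programming.py | grasshopper_count_routes
-- ===== SOURCE A (Python) =====
-- def grasshopper_count_routes(n):
--     """
--         A grasshopper is at 1.
--     It can make a move  only at +1, +2 or +3.
--     How many routes are exist to reach point N?
--     Recursive function is:
--                |F(n-1) + F(n-2) + F(n-3)
--                |F(0) = 0
--         F(n) = |F(1) = 1
--                |F(2) = 2
--     :param n: int N points
--     :return: int number of routes
--     """
--     assert n > 0, "N must be greater than 0"
--     f = [0, 1, 2]
--     if n < 3:
--         return f[n-1]
--     for i in range(3, n+1):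
--         f[i % 3] = f[0] + f[1] + f[2]
--     return f[i % 3]
-- ===== SOURCE B (Python) =====
-- def grasshopper_count_routes(n):
--     """Same routes count, via exponentiation of the 3x3 transition matrix."""
--     assert n > 0, "N must be greater than 0"
--
--     def mul(X, Y):
--         return tuple(tuple(sum(X[i][k] * Y[k][j] for k in range(3))
--                            for j in range(3)) for i in range(3))
--
--     def mpow(M, e):
--         if e == 0:
--             return ((1, 0, 0), (0, 1, 0), (0, 0, 1))
--         H = mpow(M, e // 2)
--         H2 = mul(H, H)
--         return mul(H2, M) if e % 2 else H2
--
--     T = ((1, 1, 1), (1, 0, 0), (0, 1, 0))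
--     P = mpow(T, n)
--     # T^n * (F(2), F(1), F(0)) = (F(n+2), F(n+1), F(n)); third row gives F(n)
--     return P[2][0] * 2 + P[2][1] * 1 + P[2][2] * 0
-- ===== Notes on version B (the rewrite author's own statement) =====
-- stated objective: alternative
-- what changed: Replaced the in-place tribonacci loop with binary exponentiation of the 3x3 transition matrix applied to the seed vector (2,1,0).
-- intended difference: For n=1 and n=2 A indexes f[n-1] and returns 0 resp. 1, off by one against its own documented base cases F(1)=1, F(2)=2; B returns 1 resp. 2, the documented intended values; for n>=3 the two agree everywhere. — e.g. on grasshopper_count_routes(1): A returns 0, B returns 1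
import Mathlib
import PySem

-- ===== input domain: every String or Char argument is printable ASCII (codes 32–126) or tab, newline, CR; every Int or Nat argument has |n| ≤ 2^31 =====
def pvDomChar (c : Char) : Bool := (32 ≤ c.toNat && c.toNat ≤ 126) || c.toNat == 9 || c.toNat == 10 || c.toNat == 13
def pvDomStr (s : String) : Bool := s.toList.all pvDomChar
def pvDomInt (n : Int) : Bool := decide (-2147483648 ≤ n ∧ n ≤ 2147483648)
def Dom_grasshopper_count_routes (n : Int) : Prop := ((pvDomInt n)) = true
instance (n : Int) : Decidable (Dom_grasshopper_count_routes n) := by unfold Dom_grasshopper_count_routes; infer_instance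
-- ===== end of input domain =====

-- B replaces A's tribonacci loop by binary exponentiation of the 3x3
-- transition matrix; B also fixes A's off-by-one base cases at n = 1, 2
-- (A returns 0, 1 against its documented F(1)=1, F(2)=2), stated as D_.


-- ===== PORT A =====
-- One loop iteration: state is ((f0, f1, f2), i) — the list f plus Python's
-- loop variable i, which survives the loop (the loop is non-empty whenever
-- n ≥ 3, so the dummy initial 0 for i is never the one read back).
def pvAStep (st : (Int × Int × Int) × Int) (i : Int) : (Int × Int × Int) × Int :=
  let f := st.1
  let v := f.1 + f.2.1 + f.2.2
  match PySem.Int.mod i 3 with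
  | 0 => ((v, f.2.1, f.2.2), i)
  | 1 => ((f.1, v, f.2.2), i)
  | _ => ((f.1, f.2.1, v), i)

def grasshopper_count_routes (n : Int) : Int :=
  if n < 3 then
    -- f[n-1]; under Pre_ (n > 0) the index n-1 ∈ {0,1}, so the default is never used
    (PySem.List.pyGet? [(0 : Int), 1, 2] (n - 1)).getD 0
  else
    let s := (PySem.List.pyRange 3 (n + 1) 1).foldl pvAStep ((0, 1, 2), 0)
    match PySem.Int.mod s.2 3 with
    | 0 => s.1.1
    | 1 => s.1.2.1
    | _ => s.1.2.2

-- ===== PORT B =====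
-- 3x3 integer matrix as a triple of row triples; pvMul is Source B's `mul`,
-- pvMpow its `mpow` (Source B's exponent is the positive int n; ported as Nat
-- via n.toNat, identical for every n in B's asserted domain n > 0).
def pvMul (X Y : (Int × Int × Int) × (Int × Int × Int) × (Int × Int × Int)) :
    (Int × Int × Int) × (Int × Int × Int) × (Int × Int × Int) :=
  ((X.1.1 * Y.1.1 + X.1.2.1 * Y.2.1.1 + X.1.2.2 * Y.2.2.1,
    X.1.1 * Y.1.2.1 + X.1.2.1 * Y.2.1.2.1 + X.1.2.2 * Y.2.2.2.1,
    X.1.1 * Y.1.2.2 + X.1.2.1 * Y.2.1.2.2 + X.1.2.2 * Y.2.2.2.2),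
   (X.2.1.1 * Y.1.1 + X.2.1.2.1 * Y.2.1.1 + X.2.1.2.2 * Y.2.2.1,
    X.2.1.1 * Y.1.2.1 + X.2.1.2.1 * Y.2.1.2.1 + X.2.1.2.2 * Y.2.2.2.1,
    X.2.1.1 * Y.1.2.2 + X.2.1.2.1 * Y.2.1.2.2 + X.2.1.2.2 * Y.2.2.2.2),
   (X.2.2.1 * Y.1.1 + X.2.2.2.1 * Y.2.1.1 + X.2.2.2.2 * Y.2.2.1,
    X.2.2.1 * Y.1.2.1 + X.2.2.2.1 * Y.2.1.2.1 + X.2.2.2.2 * Y.2.2.2.1,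
    X.2.2.1 * Y.1.2.2 + X.2.2.2.1 * Y.2.1.2.2 + X.2.2.2.2 * Y.2.2.2.2))

def pvId3 : (Int × Int × Int) × (Int × Int × Int) × (Int × Int × Int) :=
  ((1, 0, 0), (0, 1, 0), (0, 0, 1))

def pvMpow (M : (Int × Int × Int) × (Int × Int × Int) × (Int × Int × Int)) (e : Nat) :
    (Int × Int × Int) × (Int × Int × Int) × (Int × Int × Int) :=
  if h : e = 0 then pvId3
  else
    let H := pvMpow M (e / 2)
    let H2 := pvMul H H
    if e % 2 = 1 then pvMul H2 M else H2
termination_by e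
decreasing_by exact Nat.div_lt_self (Nat.pos_of_ne_zero h) (by omega)

def pvT : (Int × Int × Int) × (Int × Int × Int) × (Int × Int × Int) :=
  ((1, 1, 1), (1, 0, 0), (0, 1, 0))

def grasshopper_count_routes_alt (n : Int) : Int :=
  let P := pvMpow pvT n.toNat
  P.2.2.1 * 2 + P.2.2.2.1 * 1 + P.2.2.2.2 * 0

-- ===== PRECONDITION & SPEC =====
-- Pre_: A's `assert n > 0` raises AssertionError for n ≤ 0.
def Pre_grasshopper_count_routes (n : Int) : Prop := 0 < n
instance (n : Int) : Decidable (Pre_grasshopper_count_routes n) := by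
  unfold Pre_grasshopper_count_routes; infer_instance
def pvWitness_grasshopper_count_routes : Int := 5

-- For n = 1 and n = 2, A indexes f[n-1] and returns 0 resp. 1, off by one
-- against its own documented base cases F(1)=1, F(2)=2; B returns 1 resp. 2,
-- the documented intended values; for n ≥ 3 the two agree everywhere.
def D_grasshopper_count_routes (n : Int) : Prop := n = 1 ∨ n = 2
instance (n : Int) : Decidable (D_grasshopper_count_routes n) := by
  unfold D_grasshopper_count_routes; infer_instance

def Spec_grasshopper_count_routes (n : Int) (out : Int) : Prop :=
  ¬ D_grasshopper_count_routes n → out = grasshopper_count_routes_alt n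
instance (n : Int) (out : Int) : Decidable (Spec_grasshopper_count_routes n out) := by
  unfold Spec_grasshopper_count_routes; infer_instance

def pvDiffWitness_grasshopper_count_routes : Int := 1
def pvDiffWitnessOut_grasshopper_count_routes : Int × Int := (0, 1)

-- ===== CLAIM (what is proved, stated in full; the proofs are below) =====
def Claim_unchanged_grasshopper_count_routes : Prop := ∀ (n : Int), Dom_grasshopper_count_routes n → Pre_grasshopper_count_routes n → Spec_grasshopper_count_routes n (grasshopper_count_routes n)
def Claim_changed_grasshopper_count_routes : Prop := Dom_grasshopper_count_routes (pvDiffWitness_grasshopper_count_routes) ∧ Pre_grasshopper_count_routes (pvDiffWitness_grasshopper_count_routes) ∧ D_grasshopper_count_routes (pvDiffWitness_grasshopper_count_routes) ∧ grasshopper_count_routes (pvDiffWitness_grasshopper_count_routes) = pvDiffWitnessOut_grasshopper_count_routes.1 ∧ grasshopper_count_routes_alt (pvDiffWitness_grasshopper_count_routes) = pvDiffWitnessOut_grasshopper_count_routes.2 ∧ pvDiffWitnessOut_grasshopper_count_routes.1 ≠ pvDiffWitnessOut_grasshopper_count_routes.2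
def Claim_exact_grasshopper_count_routes : Prop := ∀ (n : Int), Dom_grasshopper_count_routes n → Pre_grasshopper_count_routes n → D_grasshopper_count_routes n → grasshopper_count_routes n ≠ grasshopper_count_routes_alt n

-- ===== LEMMAS AND PROOFS =====
-- The tribonacci sequence both programs compute: F(0)=0, F(1)=1, F(2)=2.
def pvTri : Nat → Int
  | 0 => 0
  | 1 => 1
  | 2 => 2
  | m + 3 => pvTri (m + 2) + pvTri (m + 1) + pvTri m

-- plain iterated product, the reference for pvMpow
def pvNpow (M : (Int × Int × Int) × (Int × Int × Int) × (Int × Int × Int)) :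
    Nat → (Int × Int × Int) × (Int × Int × Int) × (Int × Int × Int)
  | 0 => pvId3
  | e + 1 => pvMul (pvNpow M e) M

theorem pvMul_assoc (A B C : (Int × Int × Int) × (Int × Int × Int) × (Int × Int × Int)) :
    pvMul (pvMul A B) C = pvMul A (pvMul B C) := by
  simp only [pvMul, Prod.mk.injEq]
  and_intros <;> ring

theorem pvMul_id_right (M : (Int × Int × Int) × (Int × Int × Int) × (Int × Int × Int)) :
    pvMul M pvId3 = M := by
  simp [pvMul, pvId3]

theorem pvNpow_add (M : (Int × Int × Int) × (Int × Int × Int) × (Int × Int × Int))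
    (a b : Nat) : pvNpow M (a + b) = pvMul (pvNpow M a) (pvNpow M b) := by
  induction b with
  | zero => simp [pvNpow, pvMul_id_right]
  | succ b ih =>
      have : a + (b + 1) = (a + b) + 1 := by omega
      rw [this]
      show pvMul (pvNpow M (a + b)) M = _
      rw [ih, pvMul_assoc]
      rfl

theorem pvMpow_eq_npow (M : (Int × Int × Int) × (Int × Int × Int) × (Int × Int × Int)) :
    ∀ e, pvMpow M e = pvNpow M e := by
  intro e
  induction e using Nat.strong_induction_on with
  | _ e ih =>
    rw [pvMpow]
    by_cases h0 : e = 0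
    · simp [h0, pvNpow]
    · simp only [h0, dite_false]
      rw [ih (e / 2) (Nat.div_lt_self (Nat.pos_of_ne_zero h0) (by omega))]
      by_cases hodd : e % 2 = 1
      · simp only [hodd, if_true]
        have he : e = (e / 2 + e / 2) + 1 := by omega
        conv_rhs => rw [he]
        show _ = pvMul (pvNpow M (e / 2 + e / 2)) M
        rw [pvNpow_add]
      · simp only [hodd, if_false]
        have he : e = e / 2 + e / 2 := by omega
        conv_rhs => rw [he]
        rw [pvNpow_add]

-- matrix · column vector
def pvMvec (A : (Int × Int × Int) × (Int × Int × Int) × (Int × Int × Int))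
    (v : Int × Int × Int) : Int × Int × Int :=
  (A.1.1 * v.1 + A.1.2.1 * v.2.1 + A.1.2.2 * v.2.2,
   A.2.1.1 * v.1 + A.2.1.2.1 * v.2.1 + A.2.1.2.2 * v.2.2,
   A.2.2.1 * v.1 + A.2.2.2.1 * v.2.1 + A.2.2.2.2 * v.2.2)

theorem pvMvec_mul (A B : (Int × Int × Int) × (Int × Int × Int) × (Int × Int × Int))
    (v : Int × Int × Int) : pvMvec (pvMul A B) v = pvMvec A (pvMvec B v) := by
  simp only [pvMul, pvMvec, Prod.mk.injEq]
  and_intros <;> ring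

theorem pvNpow_vec : ∀ (e k : Nat),
    pvMvec (pvNpow pvT e) (pvTri (k + 2), pvTri (k + 1), pvTri k)
      = (pvTri (e + k + 2), pvTri (e + k + 1), pvTri (e + k)) := by
  intro e
  induction e with
  | zero => intro k; simp [pvNpow, pvId3, pvMvec]
  | succ e ih =>
      intro k
      show pvMvec (pvMul (pvNpow pvT e) pvT) _ = _
      rw [pvMvec_mul]
      have hT : pvMvec pvT (pvTri (k + 2), pvTri (k + 1), pvTri k)
          = (pvTri (k + 1 + 2), pvTri (k + 1 + 1), pvTri (k + 1)) := by
        show (1 * pvTri (k + 2) + 1 * pvTri (k + 1) + 1 * pvTri k,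
              1 * pvTri (k + 2) + 0 * pvTri (k + 1) + 0 * pvTri k,
              0 * pvTri (k + 2) + 1 * pvTri (k + 1) + 0 * pvTri k) = _
        have : pvTri (k + 1 + 2) = pvTri (k + 2) + pvTri (k + 1) + pvTri k := rfl
        rw [this]
        simp only [Prod.mk.injEq]
        and_intros <;> ring
      rw [hT, ih (k + 1)]
      have h1 : e + (k + 1) + 2 = e + 1 + k + 2 := by omega
      have h2 : e + (k + 1) + 1 = e + 1 + k + 1 := by omega
      have h3 : e + (k + 1) = e + 1 + k := by omega
      rw [h1, h2, h3]

theorem pvAlt_eq_tri (n : Int) : grasshopper_count_routes_alt n = pvTri n.toNat := by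
  show (pvMpow pvT n.toNat).2.2.1 * 2 + (pvMpow pvT n.toNat).2.2.2.1 * 1
      + (pvMpow pvT n.toNat).2.2.2.2 * 0 = pvTri n.toNat
  rw [pvMpow_eq_npow]
  have h := pvNpow_vec n.toNat 0
  have h22 := congrArg (fun v => v.2.2) h
  simp only [pvMvec] at h22
  have : pvTri 2 = 2 := rfl
  calc (pvNpow pvT n.toNat).2.2.1 * 2 + (pvNpow pvT n.toNat).2.2.2.1 * 1
        + (pvNpow pvT n.toNat).2.2.2.2 * 0
      = (pvNpow pvT n.toNat).2.2.1 * pvTri 2 + (pvNpow pvT n.toNat).2.2.2.1 * pvTri 1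
        + (pvNpow pvT n.toNat).2.2.2.2 * pvTri 0 := by norm_num [pvTri]
    _ = pvTri (n.toNat + 0) := h22
    _ = pvTri n.toNat := by rw [Nat.add_zero]

-- A-side: the f-list after the iteration i = m + 3 (slots arranged by m % 3)
def pvG (m : Nat) : Int × Int × Int :=
  match m % 3 with
  | 0 => (pvTri (m + 3), pvTri (m + 1), pvTri (m + 2))
  | 1 => (pvTri (m + 2), pvTri (m + 3), pvTri (m + 1))
  | _ => (pvTri (m + 1), pvTri (m + 2), pvTri (m + 3))

theorem pvLoop : ∀ m : Nat,
    (PySem.List.pyRange 3 ((m : Int) + 4) 1).foldl pvAStep ((0, 1, 2), 0)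
      = (pvG m, (m : Int) + 3) := by
  intro m
  induction m with
  | zero => decide
  | succ m ih =>
      have hcast : ((m + 1 : Nat) : Int) + 4 = ((m : Int) + 4) + 1 := by push_cast; ring
      rw [hcast, PySem.List.pyRange_one_succ_right (by omega), List.foldl_append, ih]
      have hmod : PySem.Int.mod ((m : Int) + 4) 3 = (((m + 4) % 3 : Nat) : Int) := by
        have : ((m : Int) + 4) = ((m + 4 : Nat) : Int) := by push_cast; ring
        rw [this]
        exact_mod_cast PySem.Int.mod_natCast (m + 4) 3
      have h3 : m % 3 = 0 ∨ m % 3 = 1 ∨ m % 3 = 2 := by omega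
      rcases h3 with h | h | h <;>
      · simp only [pvAStep, pvG, List.foldl_cons, List.foldl_nil, hmod,
          show (m + 4) % 3 = ((m % 3) + 1) % 3 by omega,
          show (m + 1) % 3 = ((m % 3) + 1) % 3 by omega, h]
        norm_num [Prod.ext_iff]
        refine ⟨?_, by ring⟩
        rw [show pvTri (m + 1 + 3) = pvTri (m + 1 + 2) + pvTri (m + 1 + 1) + pvTri (m + 1) from rfl,
            show m + 1 + 2 = m + 3 from by omega, show m + 1 + 1 = m + 2 from by omega]
        ring

theorem pvA_eq_tri (n : Int) (h : 3 ≤ n) : grasshopper_count_routes n = pvTri n.toNat := by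
  have hm : n = ((n.toNat - 3 : Nat) : Int) + 3 := by omega
  set m : Nat := n.toNat - 3 with hmdef
  rw [show grasshopper_count_routes n =
      (let s := (PySem.List.pyRange 3 (n + 1) 1).foldl pvAStep ((0, 1, 2), 0)
       match PySem.Int.mod s.2 3 with
       | 0 => s.1.1
       | 1 => s.1.2.1
       | _ => s.1.2.2) from by
    simp only [grasshopper_count_routes, if_neg (by omega : ¬ n < 3)]]
  have hr : n + 1 = (m : Int) + 4 := by omega
  rw [hr, pvLoop m]
  have hmod : PySem.Int.mod ((m : Int) + 3) 3 = ((m % 3 : Nat) : Int) := by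
    have h1 : ((m : Int) + 3) = ((m + 3 : Nat) : Int) := by push_cast; ring
    rw [h1, show m % 3 = (m + 3) % 3 from by omega]
    exact_mod_cast PySem.Int.mod_natCast (m + 3) 3
  have hn : n.toNat = m + 3 := by omega
  have h3 : m % 3 = 0 ∨ m % 3 = 1 ∨ m % 3 = 2 := by omega
  rcases h3 with h | h | h <;>
    simp only [hmod, h, pvG, hn] <;> rfl

-- ===== VERDICT (by name: the statement is the Claim_ definition above) =====
theorem grasshopper_count_routes_spec : Claim_unchanged_grasshopper_count_routes := by
  intro n _ hpre hnd
  show grasshopper_count_routes n = grasshopper_count_routes_alt n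
  have h3 : 3 ≤ n := by
    simp only [Pre_grasshopper_count_routes] at hpre
    simp only [D_grasshopper_count_routes] at hnd
    omega
  rw [pvA_eq_tri n h3, pvAlt_eq_tri]
theorem grasshopper_count_routes_changed : Claim_changed_grasshopper_count_routes := by
  unfold Claim_changed_grasshopper_count_routes
  refine ⟨by decide, by decide, by decide, by decide, ?_, by decide⟩
  rw [show pvDiffWitness_grasshopper_count_routes = (1 : Int) from rfl, pvAlt_eq_tri]
  decide
theorem grasshopper_count_routes_tight : Claim_exact_grasshopper_count_routes := by
  intro n _ _ hD
  rcases hD with h | h <;> subst h <;> rw [pvAlt_eq_tri] <;> decide
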